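-- pv_equiv track=rewrite | github.com/foreandr/DataMarketplace | src/_charityvillage_jobs/jsonify.py | _first_job_url
-- ===== SOURCE A (Python) =====
-- def _first_job_url(row: list[str]) -> str:
--     for item in row:
--         if isinstance(item, str) and item.startswith("/job/"):
--             return "https://www.charityvillage.com" + item
--     for item in row:
--         if isinstance(item, str) and item.startswith("http"):
--             return item
--     return ""
-- ===== SOURCE B (Python) =====
-- def _first_job_url(row: list[str]) -> str:
--     fallback = None
--     for item in row:
--         if isinstance(item, str) and item.startswith("/job/"):
--             return "https://www.charityvillage.com" + item
--         if fallback is None and isinstance(item, str) and item.startswith("http"):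
--             fallback = item
--     return fallback if fallback is not None else ""
-- ===== Notes on version B (the rewrite author's own statement) =====
-- stated objective: alternative
-- what changed: Replaces A's two sequential scans of the row with a single pass that returns on the first /job/ item and keeps the first http item as a guarded fallback returned after the loop.
import Mathlib
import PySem

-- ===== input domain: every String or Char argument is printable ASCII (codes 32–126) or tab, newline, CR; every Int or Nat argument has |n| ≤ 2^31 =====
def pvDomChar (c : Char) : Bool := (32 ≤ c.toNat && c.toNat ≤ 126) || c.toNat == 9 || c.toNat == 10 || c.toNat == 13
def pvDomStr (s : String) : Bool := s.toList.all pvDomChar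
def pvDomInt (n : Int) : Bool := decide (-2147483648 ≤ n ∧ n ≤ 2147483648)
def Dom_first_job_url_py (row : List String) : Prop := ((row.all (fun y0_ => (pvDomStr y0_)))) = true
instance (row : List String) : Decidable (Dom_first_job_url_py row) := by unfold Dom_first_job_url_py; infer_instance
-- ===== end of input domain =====

-- B replaces A's two sequential scans with a single pass keeping the first
-- http item as a guarded fallback (alternative decomposition, same cost).


-- ===== PORT A =====
-- first Python loop: return the prefixed URL at the first item starting with "/job/"
def pvA_pass1 (row : List String) : Option String :=
  match row with
  | [] => none
  | item :: rest =>
      if PySem.Str.startswith item "/job/" then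
        some ("https://www.charityvillage.com" ++ item)
      else pvA_pass1 rest

-- second Python loop: return the first item starting with "http"
def pvA_pass2 (row : List String) : Option String :=
  match row with
  | [] => none
  | item :: rest =>
      if PySem.Str.startswith item "http" then some item
      else pvA_pass2 rest

def first_job_url_py (row : List String) : String :=
  match pvA_pass1 row with
  | some v => v
  | none =>
      match pvA_pass2 row with
      | some v => v
      | none => ""

-- ===== PORT B =====
-- single loop with accumulator `fallback : Option String`
def pvB_loop (row : List String) (fallback : Option String) : String :=
  match row with
  | [] => match fallback with | some f => f | none => ""
  | item :: rest =>
      if PySem.Str.startswith item "/job/" then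
        "https://www.charityvillage.com" ++ item
      else
        pvB_loop rest
          (if fallback.isNone && PySem.Str.startswith item "http" then some item
           else fallback)

def first_job_url_py_alt (row : List String) : String :=
  pvB_loop row none

-- ===== PRECONDITION & SPEC =====
def Spec_first_job_url_py (row : List String) (out : String) : Prop := out = first_job_url_py_alt row
instance (row : List String) (out : String) : Decidable (Spec_first_job_url_py row out) := by unfold Spec_first_job_url_py; infer_instance

-- ===== CLAIM (what is proved, stated in full; the proofs are below) =====
def Claim_equal_first_job_url_py : Prop := ∀ (row : List String), Dom_first_job_url_py row → Spec_first_job_url_py row (first_job_url_py row)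

-- ===== LEMMAS AND PROOFS =====
theorem pvB_loop_char (row : List String) :
    ∀ fallback : Option String,
      pvB_loop row fallback =
        match pvA_pass1 row with
        | some v => v
        | none =>
            match fallback with
            | some f => f
            | none => match pvA_pass2 row with | some v => v | none => "" := by
  induction row with
  | nil => intro fb; cases fb <;> rfl
  | cons item rest ih =>
      intro fb
      simp only [pvB_loop, pvA_pass1, pvA_pass2]
      by_cases hj : PySem.Str.startswith item "/job/" = true
      · rw [if_pos hj, if_pos hj]
      · rw [if_neg hj, if_neg hj, ih]
        cases fb with
        | some f =>
            simp only [Option.isNone_some, Bool.false_and, Bool.false_eq_true, if_false]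
        | none =>
            by_cases hh : PySem.Str.startswith item "http" = true
            · simp only [Option.isNone_none, Bool.true_and]
              rw [if_pos hh, if_pos hh]
            · simp only [Option.isNone_none, Bool.true_and]
              rw [if_neg hh, if_neg hh]

-- ===== VERDICT (by name: the statement is the Claim_ definition above) =====
theorem first_job_url_py_spec : Claim_equal_first_job_url_py := by
  intro row _
  unfold Spec_first_job_url_py first_job_url_py first_job_url_py_alt
  rw [pvB_loop_char]
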